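-- pv_equiv track=rewrite | github.com/dobermanch/dev-quests | src/python/challenges/problems/total_n_queens_test.py | Solution
-- ===== SOURCE A (Python) =====
-- def Solution(n: int) -> list[list[str]]:
--     def placeQueens(row, leftDiagMap, rightDiagMap, colMap) -> int:
--         if row >= n:
--             return 1
--
--         result = 0
--         for col in range(n):
--             leftDiagShift = row + col
--             rightDiagShift = n + (row - col)
--
--             if (colMap & 1 << col) != 0 \
--                 or (leftDiagMap & 1 << leftDiagShift) != 0 \
--                 or (rightDiagMap & 1 << rightDiagShift) != 0:
--                 continue
--
--             colMap |= 1 << col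
--             leftDiagMap |= 1 << leftDiagShift
--             rightDiagMap |= 1 << rightDiagShift
--
--             result += placeQueens(row + 1, leftDiagMap, rightDiagMap, colMap)
--
--             colMap &= ~(1 << col)
--             leftDiagMap &= ~(1 << leftDiagShift)
--             rightDiagMap &= ~(1 << rightDiagShift)
--
--         return result
--
--     return placeQueens(0, 0, 0, 0)
-- ===== SOURCE B (Python) =====
-- def Solution(n: int) -> int:
--     def perms(elems):
--         if not elems:
--             return [[]]
--         first, rest = elems[0], elems[1:]
--         return [q[:i] + [first] + q[i:] for q in perms(rest) for i in range(len(q) + 1)]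
--
--     count = 0
--     for p in perms(list(range(n))):
--         k = len(p)
--         if len({r + c for r, c in enumerate(p)}) == k and len({r - c for r, c in enumerate(p)}) == k:
--             count += 1
--     return count
-- ===== Notes on version B (the rewrite author's own statement) =====
-- stated objective: alternative
-- what changed: Replaces incremental bitmask backtracking with generate-and-test: build the list of all permutations of range(n) by repeated insertion and count those whose two diagonal index multisets are duplicate-free.
import Mathlib
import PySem

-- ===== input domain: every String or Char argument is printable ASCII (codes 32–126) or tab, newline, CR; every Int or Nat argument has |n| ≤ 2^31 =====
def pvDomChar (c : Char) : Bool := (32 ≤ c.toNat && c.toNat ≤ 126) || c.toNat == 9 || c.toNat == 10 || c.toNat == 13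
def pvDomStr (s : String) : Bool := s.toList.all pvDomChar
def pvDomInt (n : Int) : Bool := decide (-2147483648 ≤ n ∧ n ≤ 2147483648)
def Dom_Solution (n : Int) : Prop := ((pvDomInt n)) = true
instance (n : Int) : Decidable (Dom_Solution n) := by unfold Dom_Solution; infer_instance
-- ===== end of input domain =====

-- B replaces A's incremental bitmask backtracking by generate-and-test over all permutations
-- of range(n) (built by repeated insertion), counting those whose two diagonal-index sets are
-- duplicate-free; same exact count, no claim of speed.

-- ===== PORT A =====
-- A's 'placeQueens' backtracking: the for-loop is 'placeLoop' (mutual recursion); the proof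
-- argument 'h : row < n' only carries the else-branch fact for termination (erased at runtime).
-- Python's '1 << k', '|', '&', '~' are ported as '1 <<< k.toNat' (exact: every shift amount
-- here is nonnegative), PySem.Int.bor, PySem.Int.band and Int.not (Python-exact).
mutual
def placeQueens (n row leftDiagMap rightDiagMap colMap : Int) : Int :=
  if h : row ≥ n then 1
  else placeLoop n row (PySem.List.pyRange 0 n) 0 leftDiagMap rightDiagMap colMap (by omega)
termination_by ((n - row).toNat, 1, 0)
decreasing_by exact Prod.Lex.right _ (Prod.Lex.left _ _ (by omega))

def placeLoop (n row : Int) (cols : List Int) (result leftDiagMap rightDiagMap colMap : Int)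
    (h : row < n) : Int :=
  match cols with
  | [] => result
  | col :: rest =>
    let leftDiagShift := row + col
    let rightDiagShift := n + (row - col)
    if PySem.Int.band colMap (1 <<< col.toNat) ≠ 0
        ∨ PySem.Int.band leftDiagMap (1 <<< leftDiagShift.toNat) ≠ 0
        ∨ PySem.Int.band rightDiagMap (1 <<< rightDiagShift.toNat) ≠ 0 then
      placeLoop n row rest result leftDiagMap rightDiagMap colMap h
    else
      let colMap1 := PySem.Int.bor colMap (1 <<< col.toNat)
      let leftDiagMap1 := PySem.Int.bor leftDiagMap (1 <<< leftDiagShift.toNat)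
      let rightDiagMap1 := PySem.Int.bor rightDiagMap (1 <<< rightDiagShift.toNat)
      let result1 := result + placeQueens n (row + 1) leftDiagMap1 rightDiagMap1 colMap1
      let colMap2 := PySem.Int.band colMap1 (Int.not (1 <<< col.toNat))
      let leftDiagMap2 := PySem.Int.band leftDiagMap1 (Int.not (1 <<< leftDiagShift.toNat))
      let rightDiagMap2 := PySem.Int.band rightDiagMap1 (Int.not (1 <<< rightDiagShift.toNat))
      placeLoop n row rest result1 leftDiagMap2 rightDiagMap2 colMap2 h
termination_by ((n - row).toNat, 0, cols.length)
decreasing_by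
  · exact Prod.Lex.right _ (Prod.Lex.right _ (by simp))
  · exact Prod.Lex.left _ _ (by omega)
  · exact Prod.Lex.right _ (Prod.Lex.right _ (by simp))
end

def Solution (n : Int) : Int := placeQueens n 0 0 0 0

-- ===== PORT B =====
-- B's 'perms': all permutations by inserting the first element at every position
-- (the comprehension is the flatMap/map nest).
def permsB : List Int → List (List Int)
  | [] => [[]]
  | first :: rest =>
    (permsB rest).flatMap (fun q =>
      (PySem.List.pyRange 0 ((q.length : Int) + 1)).map (fun i =>
        PySem.List.slice q none (some i) ++ [first] ++ PySem.List.slice q (some i) none))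

def Solution_alt (n : Int) : Int :=
  (permsB (PySem.List.pyRange 0 n)).foldl (fun count p =>
    let k : Int := (p.length : Int)
    if PySem.Set.len (PySem.Set.ofList ((PySem.List.enumerate p 0).map (fun rc => rc.1 + rc.2))) = k
        ∧ PySem.Set.len (PySem.Set.ofList ((PySem.List.enumerate p 0).map (fun rc => rc.1 - rc.2))) = k
    then count + 1 else count) 0

-- ===== PRECONDITION & SPEC =====
def Spec_Solution (n : Int) (out : Int) : Prop := out = Solution_alt n
instance (n : Int) (out : Int) : Decidable (Spec_Solution n out) := by unfold Spec_Solution; infer_instance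

-- ===== CLAIM (what is proved, stated in full; the proofs are below) =====
def Claim_equal_Solution : Prop := ∀ (n : Int), Dom_Solution n → Spec_Solution n (Solution n)

-- ===== LEMMAS AND PROOFS =====

-- ---- bit-level facts ----

theorem bandNot (A B : Nat) :
    PySem.Int.band (A : Int) (Int.not (B : Int)) = ((A - (A &&& B) : Nat) : Int) := by
  cases B with
  | zero => simp [PySem.Int.band, Int.not]
  | succ b => simp [PySem.Int.band, Int.not]


theorem lorPow : ∀ (k : Nat) (A : Nat), A.testBit k = false → A ||| 2^k = A + 2^k := by
  intro k
  induction k with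
  | zero =>
    intro A h
    have h2 : A % 2 = 0 := by simpa [Nat.testBit_zero] using h
    have hbit := Nat.lor_bit false (A/2) true 0
    simp [Nat.bit] at hbit
    have hA : A = 2*(A/2) := by omega
    rw [hA]
    simpa using hbit
  | succ k ih =>
    intro A h
    have hb : (A/2).testBit k = false := by
      simpa [Nat.testBit_succ, Nat.shiftRight_succ] using h
    by_cases hp : A % 2 = 1
    · have hbit := Nat.lor_bit true (A/2) false (2^k)
      simp [Nat.bit] at hbit
      have hA : A = 2*(A/2) + 1 := by omega
      rw [hA, pow_succ]
      calc 2*(A/2) + 1 ||| 2^k * 2 = 2 * (A/2 ||| 2^k) + 1 := by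
              have h22 : 2^k * 2 = 2 * 2^k := by ring
              rw [h22]; exact hbit
        _ = 2*(A/2) + 1 + 2^k * 2 := by rw [ih _ hb]; ring
    · have hbit := Nat.lor_bit false (A/2) false (2^k)
      simp [Nat.bit] at hbit
      have hA : A = 2*(A/2) := by omega
      rw [hA, pow_succ]
      calc 2*(A/2) ||| 2^k * 2 = 2 * (A/2 ||| 2^k) := by
              have h22 : 2^k * 2 = 2 * 2^k := by ring
              rw [h22]; exact hbit
        _ = 2*(A/2) + 2^k * 2 := by rw [ih _ hb]; ring

theorem bandShl (M : Nat) (k : Nat) :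
    (PySem.Int.band (M : Int) (((1 <<< k : Nat) : Int)) ≠ 0) ↔ M.testBit k = true := by
  rw [Nat.one_shiftLeft, PySem.Int.band_natCast, Nat.and_two_pow]
  cases h : M.testBit k <;> simp

theorem borShl (M : Nat) (k : Nat) :
    PySem.Int.bor (M : Int) (((1 <<< k : Nat) : Int)) = ((M ||| 2^k : Nat) : Int) := by
  rw [Nat.one_shiftLeft, PySem.Int.bor_natCast]

theorem restoreBit (M : Nat) (k : Nat) (h : M.testBit k = false) :
    PySem.Int.band (PySem.Int.bor (M : Int) (((1 <<< k : Nat) : Int))) (Int.not (((1 <<< k : Nat) : Int))) = (M : Int) := by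
  rw [borShl, Nat.one_shiftLeft, bandNot]
  have h1 : (M ||| 2^k) &&& 2^k = 2^k := by
    rw [Nat.and_two_pow]
    simp [h]
  rw [h1, lorPow k M h]
  simp

-- ---- the mask of a list of bit positions ----

def maskOf : List Nat → Nat
  | [] => 0
  | k :: ks => 2^k ||| maskOf ks

theorem testBit_maskOf (ks : List Nat) (j : Nat) :
    (maskOf ks).testBit j = decide (j ∈ ks) := by
  induction ks with
  | nil => simp [maskOf]
  | cons k ks ih =>
    simp [maskOf, ih, Nat.testBit_two_pow, eq_comm]

theorem maskOf_append (ks : List Nat) (k : Nat) :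
    maskOf (ks ++ [k]) = maskOf ks ||| 2^k := by
  induction ks with
  | nil => simp [maskOf]
  | cons a ks ih => simp [maskOf, ih, Nat.lor_assoc]

-- ---- the shift sequences of a placement ----

def SC (q : List Int) : List Nat := q.map Int.toNat
def SL (q : List Int) : List Nat := q.zipIdx.map (fun v => v.2 + v.1.toNat)
def SR (N : Nat) (q : List Int) : List Nat := q.zipIdx.map (fun v => N + v.2 - v.1.toNat)

theorem SC_append (q : List Int) (c : Int) : SC (q ++ [c]) = SC q ++ [c.toNat] := by
  simp [SC]

theorem SL_append (q : List Int) (c : Int) : SL (q ++ [c]) = SL q ++ [q.length + c.toNat] := by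
  simp [SL, List.zipIdx_append]

theorem SR_append (N : Nat) (q : List Int) (c : Int) :
    SR N (q ++ [c]) = SR N q ++ [N + q.length - c.toNat] := by
  simp [SR, List.zipIdx_append]

def conflictB (N : Nat) (q : List Int) (c : Int) : Bool :=
  (SC q).contains c.toNat || (SL q).contains (q.length + c.toNat)
    || (SR N q).contains (N + q.length - c.toNat)

def completions (N : Nat) : Nat → List Int → Int
  | 0, _ => 1
  | f+1, q => ((PySem.List.pyRange 0 (N:Int)).map
      (fun c => if conflictB N q c then (0:Int) else completions N f (q ++ [c]))).sum

def seqs (N : Nat) : Nat → List (List Int)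
  | 0 => [[]]
  | f+1 => (PySem.List.pyRange 0 (N:Int)).flatMap (fun c => (seqs N f).map (c :: ·))

def extOk (N : Nat) : List Int → List Int → Bool
  | _, [] => true
  | q, c :: s => !conflictB N q c && extOk N (q ++ [c]) s

def okB (p : List Int) : Bool :=
  decide (PySem.Set.len (PySem.Set.ofList ((PySem.List.enumerate p 0).map (fun rc => rc.1 + rc.2))) = (p.length : Int)
    ∧ PySem.Set.len (PySem.Set.ofList ((PySem.List.enumerate p 0).map (fun rc => rc.1 - rc.2))) = (p.length : Int))

-- ---- A's backtracking equals `completions` ----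

-- ---- `completions` counts the conflict-free sequences ----

theorem A2 (N : Nat) : ∀ (fuel : Nat) (q : List Int),
    completions N fuel q = ((seqs N fuel).countP (fun s => extOk N q s) : Int) := by
  intro fuel
  induction fuel with
  | zero => intro q; simp [completions, seqs, extOk]
  | succ f ih =>
    intro q
    rw [completions, seqs]
    have H : ∀ cs : List Int,
        ((cs.map (fun c => if conflictB N q c then (0:Int) else completions N f (q ++ [c]))).sum
          = ((cs.flatMap (fun c => (seqs N f).map (c :: ·))).countP (fun s => extOk N q s) : Int)) := by
      intro cs
      induction cs with
      | nil => simp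
      | cons c cs ihc =>
        simp only [List.map_cons, List.sum_cons, List.flatMap_cons, List.countP_append, ihc,
          List.countP_map]
        have hcomp : List.countP ((fun s => extOk N q s) ∘ (c :: ·)) (seqs N f)
            = if conflictB N q c then 0 else List.countP (fun s => extOk N (q++[c]) s) (seqs N f) := by
          by_cases h : conflictB N q c
          · simp [Function.comp_def, extOk, h]
          · simp [Function.comp_def, extOk, h]
        rw [hcomp]
        by_cases h : conflictB N q c
        · simp [h]
        · simp only [h, ih (q ++ [c]), Bool.false_eq_true]
          push_cast
          ring
    exact H _

-- ---- the sequence space ----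

theorem mem_seqs (N : Nat) : ∀ (f : Nat) (s : List Int),
    s ∈ seqs N f ↔ s.length = f ∧ ∀ c ∈ s, 0 ≤ c ∧ c < (N:Int) := by
  intro f
  induction f with
  | zero =>
    intro s
    simp only [seqs, List.mem_singleton]
    constructor
    · rintro rfl; exact ⟨rfl, by simp⟩
    · rintro ⟨h1, _⟩; exact List.length_eq_zero_iff.mp h1
  | succ f ih =>
    intro s
    simp only [seqs, List.mem_flatMap, List.mem_map, PySem.List.mem_pyRange_one]
    constructor
    · rintro ⟨c, hc, t, ht, rfl⟩
      rcases (ih t).mp ht with ⟨hlen, hall⟩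
      refine ⟨by simp [hlen], ?_⟩
      intro x hx
      rcases List.mem_cons.mp hx with rfl | hx
      · exact hc
      · exact hall x hx
    · rintro ⟨hlen, hall⟩
      cases s with
      | nil => simp at hlen
      | cons c t =>
        refine ⟨c, hall c (by simp), t, (ih t).mpr ⟨by simpa using hlen, ?_⟩, rfl⟩
        intro x hx; exact hall x (by simp [hx])

theorem nodup_pyRangeN (N : Nat) : (PySem.List.pyRange 0 (N:Int)).Nodup := by
  rw [PySem.List.pyRange_zero_natCast]
  exact List.nodup_range.map (fun a b => by omega)

theorem nodup_seqs (N : Nat) : ∀ (f : Nat), (seqs N f).Nodup := by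
  intro f
  induction f with
  | zero => simp [seqs]
  | succ f ih =>
    rw [seqs, List.nodup_flatMap]
    refine ⟨fun c _ => ih.map (fun a b h => by simpa using h), ?_⟩
    have hnd := nodup_pyRangeN N
    rw [List.Nodup] at hnd
    refine hnd.imp ?_
    intro a b hab s hs hs'
    simp only [List.mem_map] at hs hs'
    rcases hs with ⟨t, _, rfl⟩
    rcases hs' with ⟨t', _, h⟩
    exact hab (by simpa using (List.cons_eq_cons.mp h).1.symm)

-- ---- extOk is joint distinctness of the three shift sequences ----

theorem SC_app (a b : List Int) : SC (a ++ b) = SC a ++ SC b := by simp [SC]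

theorem SL_app (a b : List Int) :
    SL (a ++ b) = SL a ++ (b.zipIdx a.length).map (fun v => v.2 + v.1.toNat) := by
  simp [SL, List.zipIdx_append]

theorem SR_app (N : Nat) (a b : List Int) :
    SR N (a ++ b) = SR N a ++ (b.zipIdx a.length).map (fun v => N + v.2 - v.1.toNat) := by
  simp [SR, List.zipIdx_append]

theorem conflict_mem (N : Nat) (q : List Int) (c : Int) :
    conflictB N q c = true ↔
      c.toNat ∈ SC q ∨ (q.length + c.toNat) ∈ SL q ∨ (N + q.length - c.toNat) ∈ SR N q := by
  simp [conflictB, or_assoc]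

theorem not_mem_of_nodup_middle {X R : List Nat} {y : Nat} (h : (X ++ y :: R).Nodup) : y ∉ X := by
  rcases List.nodup_append.mp h with ⟨_, _, hdis⟩
  intro hy
  exact hdis y hy y (by simp) rfl

theorem nodup_snoc {X : List Nat} {y : Nat} (h : X.Nodup) (hy : y ∉ X) : (X ++ [y]).Nodup := by
  rw [List.nodup_append]
  refine ⟨h, by simp, ?_⟩
  intro a ha b hb
  simp only [List.mem_singleton] at hb
  subst hb
  exact fun hab => hy (hab ▸ ha)

theorem ext_iff (N : Nat) : ∀ (s q : List Int),
    (SC q).Nodup → (SL q).Nodup → (SR N q).Nodup →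
    (extOk N q s = true ↔ ((SC (q++s)).Nodup ∧ (SL (q++s)).Nodup ∧ (SR N (q++s)).Nodup)) := by
  intro s
  induction s with
  | nil =>
    intro q h1 h2 h3
    simp only [List.append_nil, extOk]
    exact ⟨fun _ => ⟨h1, h2, h3⟩, fun _ => by trivial⟩
  | cons c s ihs =>
    intro q h1 h2 h3
    have hSC : SC (q ++ c :: s) = SC q ++ c.toNat :: SC s := by
      rw [SC_app]; simp [SC]
    have hSL : SL (q ++ c :: s)
        = SL q ++ (q.length + c.toNat) :: (s.zipIdx (q.length + 1)).map (fun v => v.2 + v.1.toNat) := by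
      rw [SL_app, List.zipIdx_cons]; simp
    have hSR : SR N (q ++ c :: s)
        = SR N q ++ (N + q.length - c.toNat) :: (s.zipIdx (q.length + 1)).map (fun v => N + v.2 - v.1.toNat) := by
      rw [SR_app, List.zipIdx_cons]; simp
    by_cases hc : conflictB N q c
    · rw [extOk]
      simp only [hc, Bool.not_true, Bool.false_and, Bool.false_eq_true, false_iff]
      rintro ⟨hC, hL, hR⟩
      rcases (conflict_mem N q c).mp hc with hm | hm | hm
      · exact not_mem_of_nodup_middle (hSC ▸ hC) hm
      · exact not_mem_of_nodup_middle (hSL ▸ hL) hm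
      · exact not_mem_of_nodup_middle (hSR ▸ hR) hm
    · have hmem := (conflict_mem N q c).not.mp hc
      obtain ⟨hm1, hmem'⟩ := not_or.mp hmem
      obtain ⟨hm2, hm3⟩ := not_or.mp hmem' 
      rw [extOk]
      simp only [hc, Bool.not_false, Bool.true_and]
      simp only [List.append_cons q c s]
      exact ihs (q ++ [c])
        (by rw [SC_append]; exact nodup_snoc h1 hm1)
        (by rw [SL_append]; exact nodup_snoc h2 hm2)
        (by rw [SR_append]; exact nodup_snoc h3 hm3)

theorem placeQueens_eq (n row ld rd cm : Int) :
    placeQueens n row ld rd cm = if h : row ≥ n then 1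
      else placeLoop n row (PySem.List.pyRange 0 n) 0 ld rd cm (by omega) := by
  rw [placeQueens]

theorem placeLoop_nil (n row : Int) (r ld rd cm : Int) (h : row < n) :
    placeLoop n row [] r ld rd cm h = r := by
  rw [placeLoop]

theorem placeLoop_cons (n row col : Int) (rest : List Int) (r ld rd cm : Int) (h : row < n) :
    placeLoop n row (col :: rest) r ld rd cm h =
      if PySem.Int.band cm (1 <<< col.toNat) ≠ 0
          ∨ PySem.Int.band ld (1 <<< (row + col).toNat) ≠ 0
          ∨ PySem.Int.band rd (1 <<< (n + (row - col)).toNat) ≠ 0 then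
        placeLoop n row rest r ld rd cm h
      else
        placeLoop n row rest
          (r + placeQueens n (row + 1)
            (PySem.Int.bor ld (1 <<< (row + col).toNat))
            (PySem.Int.bor rd (1 <<< (n + (row - col)).toNat))
            (PySem.Int.bor cm (1 <<< col.toNat)))
          (PySem.Int.band (PySem.Int.bor ld (1 <<< (row + col).toNat)) (Int.not (1 <<< (row + col).toNat)))
          (PySem.Int.band (PySem.Int.bor rd (1 <<< (n + (row - col)).toNat)) (Int.not (1 <<< (n + (row - col)).toNat)))
          (PySem.Int.band (PySem.Int.bor cm (1 <<< col.toNat)) (Int.not (1 <<< col.toNat))) h := by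
  rw [placeLoop]

theorem A1 (N : Nat) : ∀ (fuel : Nat) (q : List Int), q.length + fuel = N →
    (∀ c ∈ q, 0 ≤ c ∧ c < (N:Int)) →
    placeQueens (N:Int) (q.length : Int) ((maskOf (SL q) : Nat) : Int)
      ((maskOf (SR N q) : Nat) : Int) ((maskOf (SC q) : Nat) : Int) = completions N fuel q := by
  intro fuel
  induction fuel with
  | zero =>
    intro q hlen _
    rw [placeQueens_eq, dif_pos (by omega)]
    rfl
  | succ f ih =>
    intro q hlen hq
    have hrowlt : ((q.length : Nat) : Int) < (N:Int) := by omega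
    rw [placeQueens_eq, dif_neg (by omega), completions]
    suffices H : ∀ (cols : List Int), (∀ c ∈ cols, 0 ≤ c ∧ c < (N:Int)) →
        ∀ (acc : Int) (h : ((q.length : Nat) : Int) < (N:Int)),
        placeLoop (N:Int) (q.length : Int) cols acc ((maskOf (SL q) : Nat) : Int)
            ((maskOf (SR N q) : Nat) : Int) ((maskOf (SC q) : Nat) : Int) h
          = acc + (cols.map (fun c => if conflictB N q c then (0:Int) else completions N f (q ++ [c]))).sum by
      rw [H _ (fun c hc => (PySem.List.mem_pyRange_one).mp hc) 0 hrowlt, zero_add]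
    intro cols
    induction cols with
    | nil =>
      intro _ acc h
      rw [placeLoop_nil]
      simp
    | cons col rest ihc =>
      intro hcols acc h
      obtain ⟨hc0, hcN⟩ := hcols col (by simp)
      have hrest : ∀ c ∈ rest, 0 ≤ c ∧ c < (N:Int) := fun c hc => hcols c (by simp [hc])
      have eL : (((q.length : Nat) : Int) + col).toNat = q.length + col.toNat := by omega
      have eR : ((N:Int) + (((q.length : Nat) : Int) - col)).toNat = N + q.length - col.toNat := by omega
      have htest : (PySem.Int.band ((maskOf (SC q) : Nat) : Int) (1 <<< col.toNat) ≠ 0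
          ∨ PySem.Int.band ((maskOf (SL q) : Nat) : Int) (1 <<< (((q.length : Nat) : Int) + col).toNat) ≠ 0
          ∨ PySem.Int.band ((maskOf (SR N q) : Nat) : Int) (1 <<< ((N:Int) + (((q.length : Nat) : Int) - col)).toNat) ≠ 0)
          ↔ conflictB N q col = true := by
        rw [bandShl, bandShl, bandShl, eL, eR]
        simp [testBit_maskOf, conflictB, or_assoc]
      rw [placeLoop_cons]
      by_cases hcf : conflictB N q col
      · rw [if_pos (htest.mpr hcf), ihc hrest acc h]
        simp [hcf]
      · have hncf := fun hx => hcf (htest.mp hx)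
        rw [if_neg hncf, eL, eR]
        obtain ⟨nm1, nmr⟩ := not_or.mp ((conflict_mem N q col).not.mp hcf)
        obtain ⟨nm2, nm3⟩ := not_or.mp nmr
        have hm1 : PySem.Int.bor ((maskOf (SC q) : Nat) : Int) (1 <<< col.toNat)
            = ((maskOf (SC (q ++ [col])) : Nat) : Int) := by
          rw [borShl, SC_append, maskOf_append]
        have hm2 : PySem.Int.bor ((maskOf (SL q) : Nat) : Int) (1 <<< (q.length + col.toNat))
            = ((maskOf (SL (q ++ [col])) : Nat) : Int) := by
          rw [borShl, SL_append, maskOf_append]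
        have hm3 : PySem.Int.bor ((maskOf (SR N q) : Nat) : Int) (1 <<< (N + q.length - col.toNat))
            = ((maskOf (SR N (q ++ [col])) : Nat) : Int) := by
          rw [borShl, SR_append, maskOf_append]
        rw [hm1, hm2, hm3]
        have hr1 : PySem.Int.band ((maskOf (SC (q ++ [col])) : Nat) : Int) (Int.not (1 <<< col.toNat))
            = ((maskOf (SC q) : Nat) : Int) := by
          rw [SC_append, maskOf_append, ← borShl]
          exact restoreBit _ _ (by rw [testBit_maskOf]; simpa using nm1)
        have hr2 : PySem.Int.band ((maskOf (SL (q ++ [col])) : Nat) : Int) (Int.not (1 <<< (q.length + col.toNat)))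
            = ((maskOf (SL q) : Nat) : Int) := by
          rw [SL_append, maskOf_append, ← borShl]
          exact restoreBit _ _ (by rw [testBit_maskOf]; simpa using nm2)
        have hr3 : PySem.Int.band ((maskOf (SR N (q ++ [col])) : Nat) : Int) (Int.not (1 <<< (N + q.length - col.toNat)))
            = ((maskOf (SR N q) : Nat) : Int) := by
          rw [SR_append, maskOf_append, ← borShl]
          exact restoreBit _ _ (by rw [testBit_maskOf]; simpa using nm3)
        rw [hr1, hr2, hr3]
        have hstep : (((q.length : Nat) : Int) + 1) = (((q ++ [col]).length : Nat) : Int) := by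
          simp
        rw [hstep, ih (q ++ [col]) (by simp; omega) ?_, ihc hrest _ h]
        · simp [hcf]
          ring
        · intro c hc
          rcases List.mem_append.mp hc with hc' | hc'
          · exact hq c hc'
          · simp only [List.mem_singleton] at hc'
            subst hc'
            exact ⟨hc0, hcN⟩


-- ---- bridges between the Nat shift sequences and B's Int diagonal lists ----

theorem bridgeC (p : List Int) (hp : ∀ c ∈ p, 0 ≤ c) : (SC p).Nodup ↔ p.Nodup := by
  simp only [SC, List.Nodup, List.pairwise_map]
  apply List.Pairwise.iff_of_mem
  intro a b ha hb
  have := hp a ha; have := hp b hb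
  constructor <;> intro h <;> omega

theorem fst_mem_of_mem_zipIdx {p : List Int} {v : Int × Nat} (h : v ∈ p.zipIdx) : v.1 ∈ p := by
  obtain ⟨x, i⟩ := v
  rcases List.mem_zipIdx h with ⟨_, hi, hx⟩
  simp only [Nat.sub_zero] at hx
  show x ∈ p
  rw [hx]
  exact List.getElem_mem _

theorem bridgeL (p : List Int) (hp : ∀ c ∈ p, 0 ≤ c) :
    (SL p).Nodup ↔ ((PySem.List.enumerate p 0).map (fun rc => rc.1 + rc.2)).Nodup := by
  rw [PySem.List.enumerate_eq_zipIdx_map, List.map_map]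
  simp only [SL, List.Nodup, List.pairwise_map]
  apply List.Pairwise.iff_of_mem
  intro a b ha hb
  have h1 := hp a.1 (fst_mem_of_mem_zipIdx ha)
  have h2 := hp b.1 (fst_mem_of_mem_zipIdx hb)
  simp only [Function.comp]
  constructor <;> intro h <;> intro hEq <;> apply h <;> omega

theorem bridgeR (N : Nat) (p : List Int) (hp : ∀ c ∈ p, 0 ≤ c ∧ c < (N:Int)) :
    (SR N p).Nodup ↔ ((PySem.List.enumerate p 0).map (fun rc => rc.1 - rc.2)).Nodup := by
  rw [PySem.List.enumerate_eq_zipIdx_map, List.map_map]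
  simp only [SR, List.Nodup, List.pairwise_map]
  apply List.Pairwise.iff_of_mem
  intro a b ha hb
  have h1 := hp a.1 (fst_mem_of_mem_zipIdx ha)
  have h2 := hp b.1 (fst_mem_of_mem_zipIdx hb)
  simp only [Function.comp]
  constructor <;> intro h <;> intro hEq <;> apply h <;> omega

theorem ofList_sublist (l : List Int) : List.Sublist (PySem.Set.ofList l) l := by
  induction l with
  | nil => simp [PySem.Set.ofList_nil]
  | cons x xs ih =>
    rw [PySem.Set.ofList_cons]
    exact List.Sublist.cons₂ x ((List.filter_sublist).trans ih)

theorem setLen_iff (l : List Int) :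
    PySem.Set.len (PySem.Set.ofList l) = (l.length : Int) ↔ l.Nodup := by
  constructor
  · intro h
    have hlen : (PySem.Set.ofList l).length = l.length := by
      simpa [PySem.Set.len] using h
    have heq := (ofList_sublist l).eq_of_length hlen
    rw [← heq]
    exact PySem.Set.nodup_ofList l
  · intro h
    rw [PySem.Set.ofList_eq_self_of_nodup l h]
    simp [PySem.Set.len]

-- ---- B's perms is permutations' ----

theorem permsAux_eq : ∀ (x : Int) (q : List Int),
    List.permutations'Aux x q = (List.range (q.length+1)).map (fun i => q.take i ++ x :: q.drop i) := by
  intro x q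
  induction q with
  | nil => simp [List.permutations'Aux, List.range_succ]
  | cons y ys ih =>
    simp only [List.permutations'Aux, List.length_cons]
    rw [List.range_succ_eq_map]
    simp [ih, List.map_map, Function.comp, List.take_succ_cons, List.drop_succ_cons]

theorem permsB_eq : ∀ (l : List Int), permsB l = l.permutations' := by
  intro l
  induction l with
  | nil => rfl
  | cons first rest ih =>
    rw [permsB, ih]
    have hq : ∀ q : List Int,
        (PySem.List.pyRange 0 ((q.length:Int)+1)).map
            (fun i => PySem.List.slice q none (some i) ++ [first] ++ PySem.List.slice q (some i) none)
          = List.permutations'Aux first q := by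
      intro q
      rw [show ((q.length:Int)+1) = (((q.length+1 : Nat)):Int) from by push_cast; ring]
      rw [PySem.List.pyRange_zero_natCast, List.map_map, permsAux_eq]
      apply List.map_congr_left
      intro i _
      simp only [Function.comp]
      rw [PySem.List.slice_to q (by positivity), PySem.List.slice_from q (by positivity)]
      simp
    simp only [hq]
    rfl

theorem foldl_okB (L : List (List Int)) (a : Int) :
    L.foldl (fun count p =>
      if PySem.Set.len (PySem.Set.ofList ((PySem.List.enumerate p 0).map (fun rc => rc.1 + rc.2))) = (p.length : Int)
          ∧ PySem.Set.len (PySem.Set.ofList ((PySem.List.enumerate p 0).map (fun rc => rc.1 - rc.2))) = (p.length : Int)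
      then count + 1 else count) a = a + (L.countP okB : Int) := by
  rw [PySem.List.foldl_ite_add_one]
  rfl

theorem altCount (n : Int) :
    Solution_alt n = ((PySem.List.pyRange 0 n).permutations'.countP okB : Int) := by
  unfold Solution_alt
  rw [permsB_eq]
  simpa using foldl_okB ((PySem.List.pyRange 0 n).permutations') 0

-- ---- the two filtered lists coincide ----

theorem length_pyRangeN (N : Nat) : (PySem.List.pyRange 0 (N:Int)).length = N := by
  rw [PySem.List.pyRange_zero_natCast]; simp

theorem filter_mem_iff (N : Nat) (p : List Int) :
    (p ∈ seqs N N ∧ extOk N [] p = true)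
      ↔ (p ∈ (PySem.List.pyRange 0 (N:Int)).permutations' ∧ okB p = true) := by
  have e1 : ((PySem.List.enumerate p 0).map (fun rc => rc.1 + rc.2)).length = p.length := by
    simp [PySem.List.length_enumerate]
  have e2 : ((PySem.List.enumerate p 0).map (fun rc => rc.1 - rc.2)).length = p.length := by
    simp [PySem.List.length_enumerate]
  constructor
  · rintro ⟨hmem, hok⟩
    rcases (mem_seqs N N p).mp hmem with ⟨hlen, hall⟩
    have h0 : ∀ c ∈ p, 0 ≤ c := fun c hc => (hall c hc).1
    have hnod : (SC p).Nodup ∧ (SL p).Nodup ∧ (SR N p).Nodup := by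
      have h := (ext_iff N p [] (by simp [SC]) (by simp [SL]) (by simp [SR])).mp hok
      simpa using h
    have hpnd : p.Nodup := (bridgeC p h0).mp hnod.1
    have hperm : p.Perm (PySem.List.pyRange 0 (N:Int)) := by
      apply List.Subperm.perm_of_length_le
      · apply List.subperm_of_subset hpnd
        intro x hx
        rw [PySem.List.mem_pyRange_one]
        exact hall x hx
      · rw [length_pyRangeN, hlen]
    refine ⟨List.mem_permutations'.mpr hperm, ?_⟩
    simp only [okB, decide_eq_true_eq]
    refine ⟨?_, ?_⟩
    · rw [← e1]; exact (setLen_iff _).mpr ((bridgeL p h0).mp hnod.2.1)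
    · rw [← e2]; exact (setLen_iff _).mpr ((bridgeR N p hall).mp hnod.2.2)
  · rintro ⟨hmem, hok⟩
    have hperm := List.mem_permutations'.mp hmem
    have hall : ∀ c ∈ p, 0 ≤ c ∧ c < (N:Int) := by
      intro c hc
      have := hperm.subset hc
      rwa [PySem.List.mem_pyRange_one] at this
    have h0 : ∀ c ∈ p, 0 ≤ c := fun c hc => (hall c hc).1
    have hlen : p.length = N := by rw [hperm.length_eq, length_pyRangeN]
    have hpnd : p.Nodup := (hperm.nodup_iff).mpr (nodup_pyRangeN N)
    simp only [okB, decide_eq_true_eq] at hok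
    obtain ⟨hs1, hs2⟩ := hok
    rw [← e1] at hs1
    rw [← e2] at hs2
    refine ⟨(mem_seqs N N p).mpr ⟨hlen, hall⟩, ?_⟩
    apply (ext_iff N p [] (by simp [SC]) (by simp [SL]) (by simp [SR])).mpr
    refine ⟨by simpa using (bridgeC p h0).mpr hpnd, ?_, ?_⟩
    · simpa using (bridgeL p h0).mpr ((setLen_iff _).mp hs1)
    · simpa using (bridgeR N p hall).mpr ((setLen_iff _).mp hs2)

theorem countEq (N : Nat) :
    ((seqs N N).countP (fun s => extOk N [] s)) = (PySem.List.pyRange 0 (N:Int)).permutations'.countP okB := by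
  rw [List.countP_eq_length_filter, List.countP_eq_length_filter]
  apply List.Perm.length_eq
  apply (List.perm_ext_iff_of_nodup ((nodup_seqs N N).filter _) ?_).mpr
  · intro p
    simp only [List.mem_filter]
    exact filter_mem_iff N p
  · apply List.Nodup.filter
    exact ((List.permutations_perm_permutations' _).nodup_iff).mp
      (List.nodup_permutations _ (nodup_pyRangeN N))

-- ===== VERDICT (by name: the statement is the Claim_ definition above) =====
theorem Solution_spec : Claim_equal_Solution := by
  intro n _
  show Solution n = Solution_alt n
  unfold Solution Solution_alt
  by_cases hn : n ≤ 0
  · rw [placeQueens_eq, dif_pos (by omega)]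
    have hpr : PySem.List.pyRange 0 n = [] := by
      simp [PySem.List.pyRange]
      omega
    rw [hpr]
    simp [permsB, PySem.Set.len]
  · have hN : n = ((n.toNat : Nat) : Int) := by omega
    have h1 := A1 n.toNat n.toNat [] (by simp) (by simp)
    have h2 : placeQueens ((n.toNat : Nat) : Int) 0 0 0 0 = completions n.toNat n.toNat [] := by
      simpa [SL, SC, SR, maskOf] using h1
    have h3 : completions n.toNat n.toNat []
        = (((PySem.List.pyRange 0 ((n.toNat : Nat) : Int)).permutations'.countP okB : Nat) : Int) := by
      rw [A2, countEq]
    have h4 := altCount n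
    rw [show Solution_alt n
        = (permsB (PySem.List.pyRange 0 n)).foldl (fun count p =>
            let k : Int := (p.length : Int)
            if PySem.Set.len (PySem.Set.ofList ((PySem.List.enumerate p 0).map (fun rc => rc.1 + rc.2))) = k
                ∧ PySem.Set.len (PySem.Set.ofList ((PySem.List.enumerate p 0).map (fun rc => rc.1 - rc.2))) = k
            then count + 1 else count) 0 from rfl] at h4
    rw [h4, hN, h2, h3]
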